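-- pv_equiv track=rewrite | github.com/454bio/ImageProcessing | ClusterSeqIP_v1.py | Img_Labeler
-- ===== SOURCE A (Python) =====
-- def Img_Labeler(total_images,image_ext):
--     """
--     input: total number of images
--     output: image name strings in "00001_645_C001" format
--     """
--     num_cycles = round(total_images/4)
--     num_labels = ['{:05d}'.format(i) for i in range(1, total_images + 1)]
--     cyc_labels = ['C{:03d}'.format(i) for i in range(1, num_cycles + 1)]
--     channel_labels = ['645', '590', '525', '445']
--
--     ImgIdx = 0
--     ImgLabels=['']*total_images
--     for cyc_label in cyc_labels:
--         for channel in channel_labels: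
--             ImgLabels[ImgIdx]=f'{num_labels[ImgIdx]}_{channel}_{cyc_label}{image_ext}'
--             ImgIdx = ImgIdx + 1
--     return ImgLabels
-- ===== SOURCE B (Python) =====
-- def Img_Labeler(total_images, image_ext):
--     """
--     input: total number of images
--     output: image name strings in "00001_645_C001" format
--     """
--     num_cycles = round(total_images / 4)
--     channels = ['645', '590', '525', '445']
--     labels = ['{:05d}_{}_C{:03d}{}'.format(i + 1, channels[i % 4], i // 4 + 1, image_ext)
--               for i in range(num_cycles * 4)]
--     return labels + [''] * (total_images - len(labels))
-- ===== Notes on version B (the rewrite author's own statement) =====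
-- stated objective: simpler
-- what changed: Replaces the nested cycle/channel loops with preallocated list, in-place assignment and a running index by a single flat comprehension over range(num_cycles*4) that derives the cycle and channel of each image from the index by divmod arithmetic, plus explicit '' padding.
import Mathlib
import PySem

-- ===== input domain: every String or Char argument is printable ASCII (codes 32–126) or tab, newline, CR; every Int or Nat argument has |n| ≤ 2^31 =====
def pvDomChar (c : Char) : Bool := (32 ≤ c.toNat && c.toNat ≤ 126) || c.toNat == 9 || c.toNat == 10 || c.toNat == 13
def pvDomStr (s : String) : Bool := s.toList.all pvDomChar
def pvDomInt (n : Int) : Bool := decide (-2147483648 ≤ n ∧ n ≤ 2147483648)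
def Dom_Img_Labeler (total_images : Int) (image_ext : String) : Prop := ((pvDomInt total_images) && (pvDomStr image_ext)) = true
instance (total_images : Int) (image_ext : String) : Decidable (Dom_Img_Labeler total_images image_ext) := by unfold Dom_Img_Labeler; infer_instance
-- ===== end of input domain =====

-- B replaces A's nested cycle/channel loops with preallocation, in-place writes and a
-- running index by one flat comprehension over the image index plus explicit '' padding
-- (simpler decomposition, same cost).


-- shared helpers (both Pythons compute round(total_images/4) and zero-padded decimals)

-- '{:0wd}'.format(n): for the n ≥ 0 used here this is str(n).zfill(w) — exact
def pvPad (w : Nat) (n : Int) : String := PySem.Str.zfill (PySem.Int.toStr n) w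

-- round(n/4): n/4 is exact in Python's binary float for |n| ≤ 2^31, so round(n/4) is
-- nearest integer with ties to even, computed here exactly in integer arithmetic
def pvRound4 (n : Int) : Int :=
  let q := PySem.Int.floordiv n 4
  let r := PySem.Int.mod n 4
  if r = 3 ∨ (r = 2 ∧ PySem.Int.mod q 2 = 1) then q + 1 else q

-- ===== PORT A =====
def Img_Labeler (total_images : Int) (image_ext : String) : List String :=
  let num_cycles := pvRound4 total_images
  let num_labels := (PySem.List.pyRange 1 (total_images + 1) 1).map (fun i => pvPad 5 i)
  let cyc_labels := (PySem.List.pyRange 1 (num_cycles + 1) 1).map (fun i => "C" ++ pvPad 3 i)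
  let channel_labels := ["645", "590", "525", "445"]
  -- ImgIdx starts at 0 and is only incremented, so Nat is faithful; Python raises
  -- IndexError once ImgIdx reaches len(num_labels) — excluded by Pre_ (getD/set are
  -- total stand-ins there)
  let init : Nat × List String := (0, List.replicate total_images.toNat "")
  let fin := cyc_labels.foldl (fun st cyc_label =>
    channel_labels.foldl (fun st channel =>
      (st.1 + 1,
       st.2.set st.1 (num_labels.getD st.1 "" ++ "_" ++ channel ++ "_" ++ cyc_label ++ image_ext))) st) init
  fin.2

-- ===== PORT B =====
def Img_Labeler_alt (total_images : Int) (image_ext : String) : List String :=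
  let num_cycles := pvRound4 total_images
  let channels := ["645", "590", "525", "445"]
  let labels := (PySem.List.pyRange 0 (num_cycles * 4) 1).map (fun i =>
    pvPad 5 (i + 1) ++ "_" ++ PySem.List.pyGetD channels (PySem.Int.mod i 4) "" ++ "_C" ++
      pvPad 3 (PySem.Int.floordiv i 4 + 1) ++ image_ext)
  labels ++ List.replicate (total_images - (labels.length : Int)).toNat ""

-- ===== PRECONDITION & SPEC =====
-- Pre_ excludes exactly the inputs on which A raises IndexError: nonnegative
-- total_images with total_images % 4 == 3 or total_images % 8 == 6, where
-- round(total_images/4)*4 exceeds total_images and the write index runs off the lists.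
def Pre_Img_Labeler (total_images : Int) (image_ext : String) : Prop :=
  total_images < 0 ∨ PySem.Int.mod total_images 4 = 0 ∨ PySem.Int.mod total_images 4 = 1 ∨
    PySem.Int.mod total_images 8 = 2
instance (total_images : Int) (image_ext : String) : Decidable (Pre_Img_Labeler total_images image_ext) := by unfold Pre_Img_Labeler; infer_instance
def pvWitness_Img_Labeler : Int × String := (5, ".tif")

def Spec_Img_Labeler (total_images : Int) (image_ext : String) (out : List String) : Prop := out = Img_Labeler_alt total_images image_ext
instance (total_images : Int) (image_ext : String) (out : List String) : Decidable (Spec_Img_Labeler total_images image_ext out) := by unfold Spec_Img_Labeler; infer_instance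

-- ===== CLAIM (what is proved, stated in full; the proofs are below) =====
def Claim_equal_Img_Labeler : Prop := ∀ (total_images : Int) (image_ext : String), Dom_Img_Labeler total_images image_ext → Pre_Img_Labeler total_images image_ext → Spec_Img_Labeler total_images image_ext (Img_Labeler total_images image_ext)

-- ===== LEMMAS AND PROOFS =====

lemma pvRound4_eq (n : Int) :
    pvRound4 n = if n % 4 = 3 ∨ (n % 4 = 2 ∧ (n / 4) % 2 = 1) then n / 4 + 1 else n / 4 := by
  simp only [pvRound4, PySem.Int.floordiv_eq_ediv_of_pos (show (0:Int) < 4 by norm_num),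
    PySem.Int.mod_eq_emod_of_pos (show (0:Int) < 4 by norm_num),
    PySem.Int.mod_eq_emod_of_pos (show (0:Int) < 2 by norm_num)]

def pvG (image_ext : String) (i : Int) : String :=
  pvPad 5 (i + 1) ++ "_" ++ PySem.List.pyGetD ["645", "590", "525", "445"] (PySem.Int.mod i 4) "" ++ "_C" ++
    pvPad 3 (PySem.Int.floordiv i 4 + 1) ++ image_ext

lemma set_step (f : Nat → String) (j m : Nat) (v : String) (hj : j < m) (hv : v = f j) :
    ((List.range j).map f ++ List.replicate (m - j) "").set j v
      = (List.range (j+1)).map f ++ List.replicate (m - (j+1)) "" := by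
  rw [show m - j = (m - j - 1) + 1 from by omega, List.replicate_succ,
    List.set_append_right _ _ (by simp), hv]
  simp [List.range_succ, List.append_assoc]
  omega

lemma NL_getD (tm : Int) (j : Nat) (h0 : 0 ≤ tm) (hj : (j:Int) < tm) :
    ((PySem.List.pyRange 1 (tm + 1) 1).map (fun i => pvPad 5 i)).getD j "" = pvPad 5 ((j:Int) + 1) := by
  rw [← PySem.List.pyGetD_natCast,
    PySem.List.pyGetD_map_pyRange_one _ 1 (tm+1) j "" (by omega)]
  rw [add_comm]

lemma append_C (a b p e : String) :
    a ++ "_" ++ b ++ "_" ++ ("C" ++ p) ++ e = a ++ "_" ++ b ++ "_C" ++ p ++ e := by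
  have h : ∀ X : String, "_" ++ ("C" ++ X) = "_C" ++ X := by
    intro X; rw [← String.append_assoc]; rfl
  simp [String.append_assoc, h]

lemma val_eq (tm : Int) (ext : String) (h0 : 0 ≤ tm) (k c : Nat) (hc : c < 4)
    (hlt : 4*k+c < tm.toNat) :
    ((PySem.List.pyRange 1 (tm + 1) 1).map (fun i => pvPad 5 i)).getD (4*k+c) "" ++ "_" ++
        (["645", "590", "525", "445"].getD c "") ++ "_" ++ ("C" ++ pvPad 3 ((k:Int)+1)) ++ ext
      = pvG ext ((4*k+c : Nat) : Int) := by
  rw [NL_getD tm (4*k+c) h0 (by omega)]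
  simp only [pvG, PySem.Int.mod_eq_emod_of_pos (show (0:Int) < 4 by norm_num),
    PySem.Int.floordiv_eq_ediv_of_pos (show (0:Int) < 4 by norm_num)]
  rw [show ((4*k+c : Nat) : Int) % 4 = (c:Int) from by push_cast; omega,
    show ((4*k+c : Nat) : Int) / 4 = (k:Int) from by push_cast; omega]
  rw [append_C]
  simp

lemma loopA (tm : Int) (ext : String) (h0 : 0 ≤ tm) (k : Nat) (hk : 4*k ≤ tm.toNat) :
    ((PySem.List.pyRange 1 ((k:Int)+1) 1).map (fun i => "C" ++ pvPad 3 i)).foldl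
      (fun st cyc_label => ["645", "590", "525", "445"].foldl (fun st channel =>
        (st.1 + 1, st.2.set st.1
          (((PySem.List.pyRange 1 (tm + 1) 1).map (fun i => pvPad 5 i)).getD st.1 "" ++ "_" ++ channel ++ "_" ++ cyc_label ++ ext))) st)
      ((0 : Nat), List.replicate tm.toNat "")
    = (4*k, (List.range (4*k)).map (fun j : Nat => pvG ext (j:Int)) ++ List.replicate (tm.toNat - 4*k) "") := by
  induction k with
  | zero =>
    rw [show ((0:Nat):Int)+1 = 1 from by norm_num, PySem.List.pyRange_one_eq_nil (le_refl 1)]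
    simp
  | succ k ih =>
    rw [show (((k+1:Nat)):Int)+1 = ((k:Int)+1)+1 from by push_cast; ring,
      PySem.List.pyRange_one_succ_right (a := 1) (b := (k:Int)+1) (by omega), List.map_append, List.foldl_append,
      ih (by omega)]
    simp only [List.map_cons, List.map_nil, List.foldl_cons, List.foldl_nil]
    rw [set_step (fun j : Nat => pvG ext (j:Int)) (4*k) tm.toNat _ (by omega)
          (by simpa using val_eq tm ext h0 k 0 (by norm_num) (by omega)),
        set_step (fun j : Nat => pvG ext (j:Int)) (4*k+1) tm.toNat _ (by omega)
          (by simpa using val_eq tm ext h0 k 1 (by norm_num) (by omega)),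
        set_step (fun j : Nat => pvG ext (j:Int)) (4*k+1+1) tm.toNat _ (by omega)
          (by simpa using val_eq tm ext h0 k 2 (by norm_num) (by omega)),
        set_step (fun j : Nat => pvG ext (j:Int)) (4*k+1+1+1) tm.toNat _ (by omega)
          (by simpa using val_eq tm ext h0 k 3 (by norm_num) (by omega))]
    refine Prod.ext (by omega) ?_
    have h1 : 4*k+1+1+1+1 = 4*(k+1) := by omega
    rw [h1]

lemma alt_eq (tm : Int) (ext : String) (h0 : 0 ≤ pvRound4 tm) :
    Img_Labeler_alt tm ext
      = (List.range (4 * (pvRound4 tm).toNat)).map (fun j : Nat => pvG ext (j:Int)) ++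
          List.replicate (tm - 4 * pvRound4 tm).toNat "" := by
  simp only [Img_Labeler_alt, pvG, PySem.List.pyRange_one, List.map_map, Function.comp_def,
    zero_add, List.length_map, List.length_range]
  rw [show (pvRound4 tm * 4 - 0).toNat = 4 * (pvRound4 tm).toNat from by omega,
    show (tm - ((4 * (pvRound4 tm).toNat : Nat) : Int)).toNat = (tm - 4 * pvRound4 tm).toNat from by omega]

lemma pv_main_eq (tm : Int) (ext : String) (hpre : Pre_Img_Labeler tm ext) :
    Img_Labeler tm ext = Img_Labeler_alt tm ext := by
  by_cases htm : tm < 0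
  · have hnc : pvRound4 tm ≤ 0 := by rw [pvRound4_eq]; split_ifs <;> omega
    simp only [Img_Labeler, Img_Labeler_alt]
    rw [PySem.List.pyRange_one_eq_nil (show pvRound4 tm + 1 ≤ 1 by omega),
        PySem.List.pyRange_one_eq_nil (show pvRound4 tm * 4 ≤ 0 by omega)]
    simp [Int.toNat_of_nonpos (le_of_lt htm)]
  · rw [not_lt] at htm
    simp only [Pre_Img_Labeler, PySem.Int.mod_eq_emod_of_pos (show (0:Int) < 4 by norm_num),
      PySem.Int.mod_eq_emod_of_pos (show (0:Int) < 8 by norm_num)] at hpre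
    have h0 : 0 ≤ pvRound4 tm := by rw [pvRound4_eq]; split_ifs <;> omega
    have h4 : 4 * pvRound4 tm ≤ tm := by rw [pvRound4_eq]; split_ifs <;> omega
    simp only [Img_Labeler]
    rw [show pvRound4 tm + 1 = ((pvRound4 tm).toNat : Int) + 1 from by omega,
      loopA tm ext htm (pvRound4 tm).toNat (by omega), alt_eq tm ext h0]
    rw [show tm.toNat - 4 * (pvRound4 tm).toNat = (tm - 4 * pvRound4 tm).toNat from by omega]


-- ===== VERDICT (by name: the statement is the Claim_ definition above) =====
theorem Img_Labeler_spec : Claim_equal_Img_Labeler := by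
  intro total_images image_ext _ hpre
  unfold Spec_Img_Labeler
  exact pv_main_eq total_images image_ext hpre
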